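-- pv_equiv track=rewrite | github.com/kwakie13/NLP-solutions | Lab5/E02.py | algorithm_step
-- ===== SOURCE A (Python) =====
-- def algorithm_step(list_element, text_as_list):
--     bigram_left = list_element[1]
--     bigram_right = list_element[2]
--
--     indexes_to_del = list()
--
--     for i in range(len(text_as_list) - 1):
--         if text_as_list[i] == bigram_left and text_as_list[i + 1] == bigram_right:
--             text_as_list[i] = list_element[0]  # put bigram in text list
--             indexes_to_del.append(i + 1)  # delete spare part of bigram (the right side of it)
--
--     for i in range(len(indexes_to_del)):
--         del text_as_list[indexes_to_del[i] - i]  # delete spare ones, but remember about shrinking the list due to deleting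
--
--     return text_as_list
-- ===== SOURCE B (Python) =====
-- def algorithm_step(list_element, text_as_list):
--     merged, left, right = list_element[0], list_element[1], list_element[2]
--     out = []
--     skip = False
--     for tok, nxt in zip(text_as_list, text_as_list[1:] + [None]):
--         cur = (tok == left and nxt == right)
--         if not skip:
--             out.append(merged if cur else tok)
--         skip = cur
--     text_as_list[:] = out
--     return text_as_list
-- ===== Notes on version B (the rewrite author's own statement) =====
-- stated objective: simpler
-- what changed: Replaces A's two-phase in-place mutation (replace matches, collect indexes, then shift-adjusted deletes) with a single forward pass that decides keep/merge/drop for each position from the original values, carrying one 'previous pair matched' flag.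
import Mathlib
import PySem

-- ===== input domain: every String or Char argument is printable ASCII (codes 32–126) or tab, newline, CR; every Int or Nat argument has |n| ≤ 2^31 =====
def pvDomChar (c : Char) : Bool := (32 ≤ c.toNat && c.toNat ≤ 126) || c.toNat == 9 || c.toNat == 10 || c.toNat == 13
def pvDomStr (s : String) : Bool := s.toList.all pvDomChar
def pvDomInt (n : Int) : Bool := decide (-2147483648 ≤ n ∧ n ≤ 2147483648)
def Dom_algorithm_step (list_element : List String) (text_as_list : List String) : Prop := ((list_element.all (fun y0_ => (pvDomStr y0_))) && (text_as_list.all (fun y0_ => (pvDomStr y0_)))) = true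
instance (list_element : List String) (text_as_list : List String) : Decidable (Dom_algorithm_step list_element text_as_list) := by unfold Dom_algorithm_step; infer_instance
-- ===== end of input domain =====

-- B replaces A's two-phase in-place rewrite (replace matches, collect indexes, shift-delete) by one
-- forward pass deciding keep/merge/drop per position from the original values; the equivalence proved
-- is about the RETURN value (Python A mutates text_as_list in place; B does the same via slice assignment).

-- ===== PORT A =====
def algorithm_step (list_element : List String) (text_as_list : List String) : List String :=
  let bigram_left := PySem.List.pyGetD list_element 1 ""
  let bigram_right := PySem.List.pyGetD list_element 2 ""
  let st := (PySem.List.pyRange 0 ((text_as_list.length : Int) - 1) 1).foldl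
    (fun (st : List String × List Int) i =>
      if PySem.List.pyGetD st.1 i "" = bigram_left ∧ PySem.List.pyGetD st.1 (i + 1) "" = bigram_right then
        (PySem.List.pySetD st.1 i (PySem.List.pyGetD list_element 0 ""), st.2 ++ [i + 1])
      else st)
    (text_as_list, ([] : List Int))
  (PySem.List.pyRange 0 ((st.2.length : Int)) 1).foldl
    (fun text i =>
      ((PySem.List.pop? text (PySem.List.pyGetD st.2 i 0 - i)).map Prod.snd).getD text)
    st.1

-- ===== PORT B =====
-- one pass: `cur` = current pair matches (on the ORIGINAL values), `skip` = previous pair matched,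
-- so the current token is the consumed right half and is dropped
def algoCur (left right tok : String) (rest : List String) : Bool :=
  (tok == left) && (match rest with | nxt :: _ => nxt == right | [] => false)

def algoMergeGo (merged left right : String) (skip : Bool) : List String → List String
  | [] => []
  | tok :: rest =>
    let cur : Bool := algoCur left right tok rest
    let tail := algoMergeGo merged left right cur rest
    if skip then tail else (if cur then merged else tok) :: tail

def algorithm_step_alt (list_element : List String) (text_as_list : List String) : List String :=
  algoMergeGo (PySem.List.pyGetD list_element 0 "") (PySem.List.pyGetD list_element 1 "")
    (PySem.List.pyGetD list_element 2 "") false text_as_list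

-- ===== PRECONDITION & SPEC =====
-- Python A reads list_element[0..2], so it raises IndexError iff list_element has fewer than 3 items.
def Pre_algorithm_step (list_element : List String) (text_as_list : List String) : Prop :=
  3 ≤ list_element.length
instance (list_element : List String) (text_as_list : List String) : Decidable (Pre_algorithm_step list_element text_as_list) := by unfold Pre_algorithm_step; infer_instance
def pvWitness_algorithm_step : List String × List String := (["ab", "a", "b"], ["a", "b", "c", "a", "b"])
def Spec_algorithm_step (list_element : List String) (text_as_list : List String) (out : List String) : Prop := out = algorithm_step_alt list_element text_as_list
instance (list_element : List String) (text_as_list : List String) (out : List String) : Decidable (Spec_algorithm_step list_element text_as_list out) := by unfold Spec_algorithm_step; infer_instance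

-- ===== CLAIM (what is proved, stated in full; the proofs are below) =====
def Claim_equal_algorithm_step : Prop := ∀ (list_element : List String) (text_as_list : List String), Dom_algorithm_step list_element text_as_list → Pre_algorithm_step list_element text_as_list → Spec_algorithm_step list_element text_as_list (algorithm_step list_element text_as_list)

-- ===== LEMMAS AND PROOFS =====

-- whether the ORIGINAL pair (j, j+1) of t matches the bigram (l, r)
def algoMt (l r : String) (t : List String) (j : Nat) : Bool :=
  decide (j + 1 < t.length) && decide (t.getD j "" = l) && decide (t.getD (j + 1) "" = r)

-- state of A's first loop after k iterations: matched positions < k replaced by m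
def algoT (m l r : String) (t : List String) (k : Nat) : List String :=
  t.mapIdx (fun j x => if decide (j < k) && algoMt l r t j then m else x)

-- first loop fully done
def algoTf (m l r : String) (t : List String) : List String :=
  t.mapIdx (fun j x => if algoMt l r t j then m else x)

-- the Nat values of indexes_to_del
def algoEs (l r : String) (t : List String) : List Nat :=
  ((List.range (t.length - 1)).filter (algoMt l r t)).map (fun j => j + 1)

-- A's delete loop as recursion on the list of targets (each delete shifts later targets down by one)
def delRec : List String → List Nat → List String
  | xs, [] => xs
  | xs, d :: ds => delRec (xs.eraseIdx d) (ds.map (fun e => e - 1))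
termination_by _ ds => ds.length
decreasing_by simp

-- delete the given index set, by one indexed sweep
def removeIdxs (xs : List String) (ds : List Nat) : List String :=
  (List.range xs.length).filterMap (fun j => if j ∈ ds then none else xs[j]?)

-- B's pass, written over indices of the full list
def fSpec (m l r : String) (t : List String) (sk : Bool) : List String :=
  (List.range t.length).filterMap (fun j =>
    if (if j = 0 then sk else algoMt l r t (j - 1)) then none
    else some (if algoMt l r t j then m else t.getD j ""))

lemma algoT_getElem? (m l r : String) (t : List String) (k j : Nat) :
    (algoT m l r t k)[j]? = t[j]?.map (fun x => if decide (j < k) && algoMt l r t j then m else x) := by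
  simp [algoT, List.getElem?_mapIdx]

lemma algoMt_cons_succ (l r x : String) (rest : List String) (j : Nat) :
    algoMt l r (x :: rest) (j + 1) = algoMt l r rest j := by
  simp [algoMt]

lemma IeqEs (l r : String) (t : List String) :
    ((List.range (t.length - 1)).filter (algoMt l r t)).map (fun (j : Nat) => (j : Int) + 1)
    = (algoEs l r t).map (fun (e : Nat) => (e : Int)) := by
  unfold algoEs
  rw [List.map_map]
  apply List.map_congr_left
  intro a _
  simp

lemma pyRange_sub_one (n : Nat) :
    PySem.List.pyRange 0 ((n : Int) - 1) 1 = (List.range (n - 1)).map (fun (k : Nat) => (k : Int)) := by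
  cases n with
  | zero => decide
  | succ n =>
    have h1 : ((n + 1 : Nat) : Int) - 1 = ((n : Nat) : Int) := by push_cast; ring
    rw [h1, PySem.List.pyRange_zero_natCast]
    simp

lemma phase1 (m l r : String) (t : List String) (k : Nat) (hk : k ≤ t.length - 1) :
    ((List.range k).map (fun (j : Nat) => (j : Int))).foldl
      (fun (st : List String × List Int) i =>
        if PySem.List.pyGetD st.1 i "" = l ∧ PySem.List.pyGetD st.1 (i + 1) "" = r then
          (PySem.List.pySetD st.1 i m, st.2 ++ [i + 1])
        else st)
      (t, ([] : List Int))
    = (algoT m l r t k,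
       ((List.range k).filter (algoMt l r t)).map (fun (j : Nat) => (j : Int) + 1)) := by
  induction k with
  | zero =>
    simp only [List.range_zero, List.map_nil, List.foldl_nil, List.filter_nil]
    have h : algoT m l r t 0 = t := by
      apply List.ext_getElem?
      intro j
      simp [algoT_getElem?]
    rw [h]
  | succ k ih =>
    have hk' : k ≤ t.length - 1 := by omega
    have hkn : k + 1 < t.length := by omega
    rw [List.range_succ, List.map_append, List.foldl_append, ih hk']
    simp only [List.map_cons, List.map_nil, List.foldl_cons, List.foldl_nil]
    have hcast : ((k : Int) + 1) = ((k + 1 : Nat) : Int) := by push_cast; ring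
    have e1 : PySem.List.pyGetD (algoT m l r t k) (k : Int) "" = t.getD k "" := by
      rw [PySem.List.pyGetD_natCast]
      simp only [List.getD_eq_getElem?_getD, algoT_getElem?]
      simp
    have e2 : PySem.List.pyGetD (algoT m l r t k) ((k : Int) + 1) "" = t.getD (k + 1) "" := by
      rw [hcast, PySem.List.pyGetD_natCast]
      simp only [List.getD_eq_getElem?_getD, algoT_getElem?]
      have h : ¬ (k + 1 < k) := by omega
      simp [h]
    have hMt : (algoMt l r t k = true) ↔ (t.getD k "" = l ∧ t.getD (k + 1) "" = r) := by
      simp [algoMt, hkn]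
    by_cases hc : t.getD k "" = l ∧ t.getD (k + 1) "" = r
    · have hM : algoMt l r t k = true := hMt.mpr hc
      rw [if_pos (by rw [e1, e2]; exact hc)]
      have hfst : PySem.List.pySetD (algoT m l r t k) (k : Int) m = algoT m l r t (k + 1) := by
        rw [PySem.List.pySetD_natCast]
        apply List.ext_getElem?
        intro j
        rw [List.getElem?_set]
        by_cases hj : j = k
        · subst hj
          have hjlen : j < t.length := by omega
          have hTlen : (algoT m l r t j).length = t.length := by simp [algoT]
          simp [algoT_getElem?, hM, hTlen, hjlen]
        · have hcond : (decide (j < k) && algoMt l r t j) = (decide (j < k + 1) && algoMt l r t j) := by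
            by_cases hjk : j < k
            · have : j < k + 1 := by omega
              simp [hjk, this]
            · have : ¬ (j < k + 1) := by omega
              simp [hjk, this]
          simp only [algoT_getElem?, if_neg (fun h : k = j => hj h.symm), hcond]
      have hsnd : List.filter (algoMt l r t) (List.range k ++ [k])
          = List.filter (algoMt l r t) (List.range k) ++ [k] := by
        rw [List.filter_append]
        simp [hM]
      rw [hfst, hsnd, List.map_append]
      simp
    · have hM : algoMt l r t k = false := Bool.eq_false_iff.mpr (fun h => hc (hMt.mp h))
      rw [if_neg (by rw [e1, e2]; exact hc)]
      have hfst : algoT m l r t k = algoT m l r t (k + 1) := by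
        apply List.ext_getElem?
        intro j
        have hcond : (decide (j < k) && algoMt l r t j) = (decide (j < k + 1) && algoMt l r t j) := by
          by_cases hj : j = k
          · subst hj; simp [hM]
          · by_cases hjk : j < k
            · have : j < k + 1 := by omega
              simp [hjk, this]
            · have : ¬ (j < k + 1) := by omega
              simp [hjk, this]
        simp only [algoT_getElem?, hcond]
      have hsnd : List.filter (algoMt l r t) (List.range k ++ [k])
          = List.filter (algoMt l r t) (List.range k) := by
        rw [List.filter_append]
        simp [hM]
      rw [hfst, hsnd]

lemma algoT_final (m l r : String) (t : List String) :
    algoT m l r t (t.length - 1) = algoTf m l r t := by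
  apply List.ext_getElem?
  intro j
  simp only [algoT_getElem?, algoTf, List.getElem?_mapIdx]
  by_cases hM : algoMt l r t j = true
  · have hj : j + 1 < t.length := by
      have h := hM
      simp only [algoMt, Bool.and_eq_true, decide_eq_true_eq] at h
      exact h.1.1
    have hlt : j < t.length - 1 := by omega
    simp [hM, hlt]
  · simp [Bool.eq_false_iff.mpr hM]

lemma phase2 : ∀ (q : Nat) (es : List Nat) (xs : List String), es.length = q →
    es.Pairwise (· < ·) → (∀ e ∈ es, e < xs.length) →
    ((List.range es.length).map (fun (k : Nat) => (k : Int))).foldl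
      (fun text i =>
        ((PySem.List.pop? text (PySem.List.pyGetD (es.map (fun (e : Nat) => (e : Int))) i 0 - i)).map
          Prod.snd).getD text)
      xs
    = delRec xs es := by
  intro q
  induction q with
  | zero =>
    intro es xs hq _ _
    rw [List.eq_nil_of_length_eq_zero hq]
    simp [delRec]
  | succ q ih =>
    intro es xs hq hpw hbd
    obtain ⟨e, es', rfl⟩ : ∃ e es', es = e :: es' := by
      cases es with
      | nil => simp at hq
      | cons a b => exact ⟨a, b, rfl⟩
    rw [List.pairwise_cons] at hpw
    obtain ⟨hall, hpw'⟩ := hpw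
    have he : e < xs.length := hbd e (by simp)
    have hq' : es'.length = q := by simpa using hq
    simp only [List.length_cons, List.range_succ_eq_map, List.map_cons, List.map_map,
      List.foldl_cons]
    have hstep :
        ((PySem.List.pop? xs
            (PySem.List.pyGetD (((e : Nat) : Int) :: es'.map (fun (e : Nat) => (e : Int)))
              (((0 : Nat) : Int)) 0 - ((0 : Nat) : Int))).map Prod.snd).getD xs
        = xs.eraseIdx e := by
      rw [PySem.List.pyGetD_natCast]
      simp only [List.getD_cons_zero, Nat.cast_zero, sub_zero]
      rw [PySem.List.pop?_natCast xs e he]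
      rfl
    rw [hstep]
    have hIH := ih (es'.map (fun e => e - 1)) (xs.eraseIdx e)
      (by simpa using hq')
      (by
        rw [List.pairwise_map]
        refine hpw'.imp_of_mem ?_
        intro a b ha hb hab
        have h1 : e < a := hall a ha
        omega)
      (by
        intro d hd
        rw [List.mem_map] at hd
        obtain ⟨a, ha, rfl⟩ := hd
        have h1 : e < a := hall a ha
        have h2 : a < xs.length := hbd a (by simp [ha])
        rw [List.length_eraseIdx_of_lt he]
        omega)
    rw [List.length_map] at hIH
    have hdel : delRec xs (e :: es') = delRec (xs.eraseIdx e) (es'.map (fun e => e - 1)) := by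
      simp [delRec]
    rw [hdel, ← hIH, List.foldl_map, List.foldl_map]
    apply PySem.List.foldl_congr_mem
    intro text k hk
    rw [List.mem_range] at hk
    simp only [Function.comp_apply]
    have hgetk : es'.getD k 0 ∈ es' := by
      rw [List.getD_eq_getElem?_getD, List.getElem?_eq_getElem hk]
      exact List.getElem_mem hk
    have h1 : 1 ≤ es'.getD k 0 := by have := hall _ hgetk; omega
    have h2 : (es'.map (fun e => e - 1)).getD k 0 = es'.getD k 0 - 1 := by
      simp only [List.getD_eq_getElem?_getD, List.getElem?_map, List.getElem?_eq_getElem hk]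
      rfl
    have harg :
        (PySem.List.pyGetD (((e : Nat) : Int) :: es'.map (fun (e : Nat) => (e : Int)))
          ((Nat.succ k : Nat) : Int) 0 - ((Nat.succ k : Nat) : Int))
        = PySem.List.pyGetD ((es'.map (fun e => e - 1)).map (fun (e : Nat) => (e : Int))) ((k : Nat) : Int) 0 -
          ((k : Nat) : Int) := by
      rw [PySem.List.pyGetD_natCast, PySem.List.pyGetD_natCast]
      simp only [Nat.succ_eq_add_one, List.getD_cons_succ]
      have hg2 : ((es'.map (fun e => e - 1)).map (fun (e : Nat) => (e : Int))).getD k 0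
          = ((es'.getD k 0 - 1 : Nat) : Int) := by
        simp only [List.getD_eq_getElem?_getD, List.getElem?_map, List.getElem?_eq_getElem hk]
        rfl
      rw [hg2]
      have hg1' : (es'.map (fun (e : Nat) => (e : Int))).getD k 0 = ((es'.getD k 0 : Nat) : Int) := by
        simp only [List.getD_eq_getElem?_getD, List.getElem?_map, List.getElem?_eq_getElem hk]
        rfl
      rw [hg1']
      omega
    rw [harg]

lemma filterMap_getElem?_range : ∀ (xs : List String),
    (List.range xs.length).filterMap (fun j => xs[j]?) = xs := by
  intro xs
  induction xs with
  | nil => simp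
  | cons x zs ih =>
    rw [List.length_cons, List.range_succ_eq_map, List.filterMap_cons, List.filterMap_map]
    simp only [List.getElem?_cons_zero, Function.comp, Nat.succ_eq_add_one,
      List.getElem?_cons_succ]
    rw [ih]

lemma removeIdxs_nil (xs : List String) : removeIdxs xs [] = xs := by
  unfold removeIdxs
  simp only [List.not_mem_nil, if_false]
  exact filterMap_getElem?_range xs

lemma removeIdxs_cons_of_pos (y : String) (zs : List String) (fs : List Nat)
    (h0 : ∀ f ∈ fs, 1 ≤ f) :
    removeIdxs (y :: zs) fs = y :: removeIdxs zs (fs.map (fun e => e - 1)) := by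
  unfold removeIdxs
  rw [List.length_cons, List.range_succ_eq_map, List.filterMap_cons, List.filterMap_map]
  have h00 : 0 ∉ fs := fun hf => by have := h0 0 hf; omega
  have hmem : ∀ j : Nat, (j ∈ fs.map (fun e => e - 1)) ↔ (j + 1) ∈ fs := by
    intro j
    rw [List.mem_map]
    constructor
    · rintro ⟨f, hf, rfl⟩
      have hf1 := h0 f hf
      have hf2 : f - 1 + 1 = f := by omega
      rwa [hf2]
    · intro hj
      exact ⟨j + 1, hj, by omega⟩
  simp only [List.getElem?_cons_zero, if_neg h00]
  congr 1
  apply List.filterMap_congr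
  intro j _
  simp only [Function.comp, Nat.succ_eq_add_one, List.getElem?_cons_succ, hmem]

lemma removeIdxs_zero_cons (y : String) (zs : List String) (es : List Nat)
    (h : ∀ d ∈ es, 1 ≤ d) :
    removeIdxs (y :: zs) (0 :: es) = removeIdxs zs (es.map (fun e => e - 1)) := by
  unfold removeIdxs
  rw [List.length_cons, List.range_succ_eq_map, List.filterMap_cons, List.filterMap_map]
  have hmem : ∀ j : Nat, (j ∈ es.map (fun e => e - 1)) ↔ (j + 1) ∈ es := by
    intro j
    rw [List.mem_map]
    constructor
    · rintro ⟨f, hf, rfl⟩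
      have hf1 := h f hf
      have hf2 : f - 1 + 1 = f := by omega
      rwa [hf2]
    · intro hj
      exact ⟨j + 1, hj, by omega⟩
  simp only [List.mem_cons]
  apply List.filterMap_congr
  intro j _
  have hz2 : (j + 1 = 0 ∨ j + 1 ∈ es) ↔ (j + 1 ∈ es) := by
    constructor
    · rintro (h | h)
      · exact absurd h (by omega)
      · exact h
    · exact Or.inr
  simp only [Function.comp, Nat.succ_eq_add_one, List.getElem?_cons_succ, hmem, hz2]

lemma removeIdxs_eraseIdx : ∀ (d : Nat) (xs : List String) (es : List Nat),
    (∀ e ∈ es, d < e) → d < xs.length →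
    removeIdxs xs (d :: es) = removeIdxs (xs.eraseIdx d) (es.map (fun e => e - 1)) := by
  intro d
  induction d with
  | zero =>
    intro xs es h1 h2
    cases xs with
    | nil => simp at h2
    | cons y zs =>
      rw [List.eraseIdx_cons_zero]
      exact removeIdxs_zero_cons y zs es (fun e he => by have := h1 e he; omega)
  | succ d ih =>
    intro xs es h1 h2
    cases xs with
    | nil => simp at h2
    | cons y zs =>
      rw [List.eraseIdx_cons_succ]
      rw [removeIdxs_cons_of_pos y zs ((d + 1) :: es)
        (by
          intro f hf
          rcases List.mem_cons.mp hf with rfl | hf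
          · omega
          · have := h1 f hf; omega)]
      rw [removeIdxs_cons_of_pos y (zs.eraseIdx d) (es.map (fun e => e - 1))
        (by
          intro f hf
          rw [List.mem_map] at hf
          obtain ⟨a, ha, rfl⟩ := hf
          have := h1 a ha; omega)]
      rw [List.map_cons]
      have hd1 : (d + 1 - 1) = d := by omega
      rw [hd1]
      rw [ih zs (es.map (fun e => e - 1))
        (by
          intro f hf
          rw [List.mem_map] at hf
          obtain ⟨a, ha, rfl⟩ := hf
          have := h1 a ha; omega)
        (by simp at h2; omega)]

lemma delRec_eq_removeIdxs : ∀ (q : Nat) (es : List Nat) (xs : List String), es.length = q →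
    es.Pairwise (· < ·) → (∀ e ∈ es, e < xs.length) →
    delRec xs es = removeIdxs xs es := by
  intro q
  induction q with
  | zero =>
    intro es xs hq _ _
    rw [List.eq_nil_of_length_eq_zero hq]
    simp [delRec, removeIdxs_nil]
  | succ q ih =>
    intro es xs hq hpw hbd
    obtain ⟨d, es', rfl⟩ : ∃ d es', es = d :: es' := by
      cases es with
      | nil => simp at hq
      | cons a b => exact ⟨a, b, rfl⟩
    rw [List.pairwise_cons] at hpw
    obtain ⟨hall, hpw'⟩ := hpw
    have hd : d < xs.length := hbd d (by simp)
    have hstep : delRec xs (d :: es') = delRec (xs.eraseIdx d) (es'.map (fun e => e - 1)) := by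
      simp [delRec]
    rw [hstep]
    rw [ih (es'.map (fun e => e - 1)) (xs.eraseIdx d)
      (by simpa using hq)
      (by
        rw [List.pairwise_map]
        refine hpw'.imp_of_mem ?_
        intro a b ha hb hab
        have := hall a ha
        omega)
      (by
        intro e he
        rw [List.mem_map] at he
        obtain ⟨a, ha, rfl⟩ := he
        have hh1 := hall a ha
        have hh2 := hbd a (by simp [ha])
        rw [List.length_eraseIdx_of_lt hd]
        omega)]
    exact (removeIdxs_eraseIdx d xs es' hall hd).symm

lemma removeIdxs_eq_fSpec (m l r : String) (t : List String) :
    removeIdxs (algoTf m l r t) (algoEs l r t) = fSpec m l r t false := by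
  unfold removeIdxs fSpec
  have hlen : (algoTf m l r t).length = t.length := by simp [algoTf]
  rw [hlen]
  apply List.filterMap_congr
  intro j hj
  rw [List.mem_range] at hj
  have hmem : (j ∈ algoEs l r t) ↔ (1 ≤ j ∧ algoMt l r t (j - 1) = true) := by
    unfold algoEs
    simp only [List.mem_map, List.mem_filter, List.mem_range]
    constructor
    · rintro ⟨a, ⟨ha1, ha2⟩, rfl⟩
      exact ⟨by omega, by simpa using ha2⟩
    · rintro ⟨hj1, hM⟩
      refine ⟨j - 1, ⟨?_, hM⟩, by omega⟩
      have h := hM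
      simp only [algoMt, Bool.and_eq_true, decide_eq_true_eq] at h
      omega
  have hget : (algoTf m l r t)[j]? = some (if algoMt l r t j then m else t.getD j "") := by
    simp only [algoTf, List.getElem?_mapIdx, List.getElem?_eq_getElem hj, Option.map_some]
    rw [List.getD_eq_getElem?_getD, List.getElem?_eq_getElem hj]
    rfl
  by_cases hskip : j = 0
  · subst hskip
    have h0 : (0 : Nat) ∉ algoEs l r t := by
      rw [hmem]; omega
    simp [h0, hget]
  · by_cases hM : algoMt l r t (j - 1) = true
    · have h1 : j ∈ algoEs l r t := hmem.mpr ⟨by omega, hM⟩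
      simp [h1, hskip, hM]
    · have h1 : j ∉ algoEs l r t := fun h => hM (hmem.mp h).2
      have hM' : algoMt l r t (j - 1) = false := Bool.eq_false_iff.mpr hM
      simp [h1, hskip, hM', hget]

lemma fSpec_eq_algoMergeGo (m l r : String) :
    ∀ (t : List String) (sk : Bool), fSpec m l r t sk = algoMergeGo m l r sk t := by
  intro t
  induction t with
  | nil => intro sk; simp [fSpec, algoMergeGo]
  | cons x rest ih =>
    intro sk
    have hcur : algoMt l r (x :: rest) 0 = algoCur l r x rest := by
      cases rest with
      | nil => simp [algoMt, algoCur]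
      | cons y ys =>
        simp only [algoCur, algoMt, List.length_cons, List.getD_cons_zero, List.getD_cons_succ]
        rw [Bool.eq_iff_iff]
        simp only [Bool.and_eq_true, decide_eq_true_eq, beq_iff_eq]
        constructor
        · rintro ⟨⟨_, h2⟩, h3⟩; exact ⟨h2, h3⟩
        · rintro ⟨h2, h3⟩; exact ⟨⟨by omega, h2⟩, h3⟩
    have htail :
        (List.range rest.length).filterMap ((fun j =>
            if (if j = 0 then sk else algoMt l r (x :: rest) (j - 1)) then none
            else some (if algoMt l r (x :: rest) j then m else (x :: rest).getD j "")) ∘ Nat.succ)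
        = fSpec m l r rest (algoMt l r (x :: rest) 0) := by
      unfold fSpec
      apply List.filterMap_congr
      intro j _
      simp only [Function.comp_apply, Nat.succ_eq_add_one]
      rw [if_neg (by omega : ¬ (j + 1 = 0))]
      rw [Nat.add_sub_cancel]
      rw [algoMt_cons_succ, List.getD_cons_succ]
      by_cases hj : j = 0
      · subst hj; rw [if_pos rfl]
      · rw [if_neg hj]
        obtain ⟨j', rfl⟩ : ∃ j', j = j' + 1 := ⟨j - 1, by omega⟩
        rw [algoMt_cons_succ, Nat.add_sub_cancel]
    unfold fSpec
    rw [List.length_cons, List.range_succ_eq_map, List.filterMap_cons, List.filterMap_map, htail,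
      ih]
    cases sk <;> simp [algoMergeGo, ← hcur]

lemma algoEs_pairwise (l r : String) (t : List String) : (algoEs l r t).Pairwise (· < ·) := by
  unfold algoEs
  rw [List.pairwise_map]
  have h1 : (List.range (t.length - 1)).Pairwise (· < ·) := List.pairwise_lt_range
  have h2 : (List.filter (algoMt l r t) (List.range (t.length - 1))).Pairwise (· < ·) :=
    List.Pairwise.sublist List.filter_sublist h1
  exact h2.imp (fun hab => by omega)

lemma algoEs_bounded (l r : String) (t : List String) :
    ∀ e ∈ algoEs l r t, e < t.length := by
  intro e he
  unfold algoEs at he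
  rw [List.mem_map] at he
  obtain ⟨a, ha, rfl⟩ := he
  rw [List.mem_filter, List.mem_range] at ha
  omega

lemma main_equiv (le t : List String) :
    algorithm_step le t = algorithm_step_alt le t := by
  simp only [algorithm_step, algorithm_step_alt]
  generalize PySem.List.pyGetD le 0 "" = m
  generalize PySem.List.pyGetD le 1 "" = l
  generalize PySem.List.pyGetD le 2 "" = r
  rw [pyRange_sub_one]
  rw [phase1 m l r t (t.length - 1) (le_refl _)]
  dsimp only
  rw [algoT_final, IeqEs, List.length_map, PySem.List.pyRange_zero_natCast]
  have hbd : ∀ e ∈ algoEs l r t, e < (algoTf m l r t).length := by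
    intro e he
    have h1 := algoEs_bounded l r t e he
    have h2 : (algoTf m l r t).length = t.length := by simp [algoTf]
    omega
  rw [phase2 (algoEs l r t).length (algoEs l r t) (algoTf m l r t) rfl
    (algoEs_pairwise l r t) hbd]
  rw [delRec_eq_removeIdxs (algoEs l r t).length (algoEs l r t) (algoTf m l r t) rfl
    (algoEs_pairwise l r t) hbd]
  rw [removeIdxs_eq_fSpec]
  exact fSpec_eq_algoMergeGo m l r t false

-- ===== VERDICT (by name: the statement is the Claim_ definition above) =====
theorem algorithm_step_spec : Claim_equal_algorithm_step := by
  intro le t _ _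
  unfold Spec_algorithm_step
  exact main_equiv le t
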